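-- pv_equiv track=rewrite | github.com/EricaNguyen/AutoAudio | freqAnalyzer.py | whichStaff
-- ===== SOURCE A (Python) =====
-- def whichStaff(myString):
--     commCount = 0
--     aposCount = 0
--     for c in myString:
--         if c == ',':
--             commCount += 1
--             break
--         if c == "'":
--             aposCount += 1
--             break
--     return (commCount, aposCount)
-- ===== SOURCE B (Python) =====
-- def whichStaff(myString):
--     ci = myString.find(',')
--     ai = myString.find("'")
--     if ci == -1 and ai == -1:
--         return (0, 0)
--     if ai == -1 or (ci != -1 and ci < ai):
--         return (1, 0)
--     return (0, 1)
-- ===== Notes on version B (the rewrite author's own statement) =====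
-- stated objective: idiomatic
-- what changed: Replaces the break-on-first-match character loop and its two counters with two str.find index scans and a comparison of the first-occurrence positions.
import Mathlib
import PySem

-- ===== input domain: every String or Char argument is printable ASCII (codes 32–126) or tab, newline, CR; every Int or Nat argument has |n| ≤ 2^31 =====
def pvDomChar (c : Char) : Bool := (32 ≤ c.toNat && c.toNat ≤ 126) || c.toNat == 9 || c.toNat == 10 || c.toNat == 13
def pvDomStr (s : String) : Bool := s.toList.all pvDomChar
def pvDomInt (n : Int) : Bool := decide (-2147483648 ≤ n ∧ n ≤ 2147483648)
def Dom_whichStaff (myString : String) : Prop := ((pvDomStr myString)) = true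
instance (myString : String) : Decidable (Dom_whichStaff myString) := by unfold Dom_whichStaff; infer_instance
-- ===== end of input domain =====

-- B replaces A's break-on-first-match loop by two str.find scans plus a position comparison (idiomatic; same cost).


-- ===== PORT A =====
-- the for-loop with break: first ',' bumps commCount and stops, first '\'' bumps aposCount and stops
def whichStaffGo : List Char → Int × Int
  | [] => (0, 0)
  | c :: rest =>
      if c = ',' then (1, 0)
      else if c = '\'' then (0, 1)
      else whichStaffGo rest

def whichStaff (myString : String) : Int × Int :=
  whichStaffGo myString.toList

-- ===== PORT B =====
def whichStaff_alt (myString : String) : Int × Int :=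
  let ci := PySem.Str.find myString ","
  let ai := PySem.Str.find myString "'"
  if ci = -1 ∧ ai = -1 then (0, 0)
  else if ai = -1 ∨ (ci ≠ -1 ∧ ci < ai) then (1, 0)
  else (0, 1)

-- ===== PRECONDITION & SPEC =====
def Spec_whichStaff (myString : String) (out : Int × Int) : Prop := out = whichStaff_alt myString
instance (myString : String) (out : Int × Int) : Decidable (Spec_whichStaff myString out) := by unfold Spec_whichStaff; infer_instance

-- ===== CLAIM (what is proved, stated in full; the proofs are below) =====
def Claim_equal_whichStaff : Prop := ∀ (myString : String), Dom_whichStaff myString → Spec_whichStaff myString (whichStaff myString)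

-- ===== LEMMAS AND PROOFS =====

-- B's branch structure abstracted over the two find results
def pvAltPair (ci ai : Int) : Int × Int :=
  if ci = -1 ∧ ai = -1 then (0, 0)
  else if ai = -1 ∨ (ci ≠ -1 ∧ ci < ai) then (1, 0)
  else (0, 1)

theorem pv_singleton_infix_iff (c : Char) (l : List Char) : [c] <:+: l ↔ c ∈ l := by
  constructor
  · intro h; exact h.sublist.subset (List.mem_singleton_self c)
  · intro h
    obtain ⟨s, t, rfl⟩ := List.append_of_mem h
    exact ⟨s, t, by simp⟩

theorem pv_find_singleton_cons (x c : Char) (l : List Char) :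
    PySem.Chars.find (x :: l) [c] =
      if x = c then 0
      else if PySem.Chars.find l [c] = -1 then -1 else PySem.Chars.find l [c] + 1 := by
  by_cases hx : x = c
  · subst hx
    have hin : [x] <:+: (x :: l) := (pv_singleton_infix_iff x (x :: l)).2 (by simp)
    have h0 : (0 : Int) ≤ PySem.Chars.find (x :: l) [x] := (PySem.Chars.find_nonneg_iff _ _).2 hin
    obtain ⟨hpre, hmin⟩ := PySem.Chars.find_spec h0
    have : (PySem.Chars.find (x :: l) [x]).toNat = 0 := by
      by_contra hne
      exact hmin 0 (Nat.pos_of_ne_zero hne) ⟨l, rfl⟩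
    have hzero : PySem.Chars.find (x :: l) [x] = 0 := by omega
    rw [hzero, if_pos rfl]
  · by_cases hmem : c ∈ l
    · -- find l [c] = g ≥ 0; find (x::l) [c] = g + 1
      have hinl : [c] <:+: l := (pv_singleton_infix_iff c l).2 hmem
      have hg0 : (0 : Int) ≤ PySem.Chars.find l [c] := (PySem.Chars.find_nonneg_iff _ _).2 hinl
      obtain ⟨hgpre, hgmin⟩ := PySem.Chars.find_spec hg0
      have hin : [c] <:+: (x :: l) := (pv_singleton_infix_iff c (x :: l)).2 (by simp [hmem])
      have hf0 : (0 : Int) ≤ PySem.Chars.find (x :: l) [c] := (PySem.Chars.find_nonneg_iff _ _).2 hin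
      obtain ⟨hfpre, hfmin⟩ := PySem.Chars.find_spec hf0
      set f := (PySem.Chars.find (x :: l) [c]).toNat with hf
      set g := (PySem.Chars.find l [c]).toNat with hg
      have hfne0 : f ≠ 0 := by
        intro h0
        rw [h0] at hfpre
        simp only [List.drop_zero] at hfpre
        obtain ⟨r, hr⟩ := hfpre
        simp at hr
        exact hx hr.1.symm
      have hdropf : (x :: l).drop f = l.drop (f - 1) := by
        obtain ⟨n, hn⟩ : ∃ n, f = n + 1 := ⟨f - 1, by omega⟩
        rw [hn]
        simp
      have hge : g ≤ f - 1 := by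
        by_contra hlt
        exact hgmin (f - 1) (by omega) (hdropf ▸ hfpre)
      have hle : f ≤ g + 1 := by
        by_contra hlt
        exact hfmin (g + 1) (by omega) (by simpa using hgpre)
      have hfg : f = g + 1 := by omega
      have hgne : PySem.Chars.find l [c] ≠ -1 := (PySem.Chars.find_ne_neg_one_iff _ _).2 hinl
      rw [if_neg hx, if_neg hgne]
      omega
    · have h1 : PySem.Chars.find (x :: l) [c] = -1 := by
        rw [PySem.Chars.find_eq_neg_one_iff, pv_singleton_infix_iff]
        simp only [List.mem_cons, not_or]
        exact ⟨fun h => hx h.symm, hmem⟩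
      have h2 : PySem.Chars.find l [c] = -1 := by
        rw [PySem.Chars.find_eq_neg_one_iff, pv_singleton_infix_iff]; exact hmem
      rw [h1, h2, if_neg hx, if_pos rfl]

theorem pv_go_eq (l : List Char) :
    whichStaffGo l = pvAltPair (PySem.Chars.find l [',']) (PySem.Chars.find l ['\'']) := by
  induction l with
  | nil =>
    have h1 : PySem.Chars.find ([] : List Char) [','] = -1 := by
      rw [PySem.Chars.find_eq_neg_one_iff, pv_singleton_infix_iff]; simp
    have h2 : PySem.Chars.find ([] : List Char) ['\''] = -1 := by
      rw [PySem.Chars.find_eq_neg_one_iff, pv_singleton_infix_iff]; simp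
    simp [whichStaffGo, pvAltPair, h1, h2]
  | cons x l ih =>
    rw [pv_find_singleton_cons, pv_find_singleton_cons]
    have hc := PySem.Chars.neg_one_le_find l [',']
    have ha := PySem.Chars.neg_one_le_find l ['\'']
    show (if x = ',' then ((1 : Int), (0 : Int))
          else if x = '\'' then (0, 1) else whichStaffGo l) = _
    by_cases hx1 : x = ','
    · subst hx1
      rw [if_pos rfl, if_pos rfl, if_neg (by decide : ¬(',' : Char) = '\'')]
      unfold pvAltPair
      split_ifs <;> first | rfl | (exfalso; omega) | (exfalso; simp_all)
    · rw [if_neg hx1, if_neg hx1]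
      by_cases hx2 : x = '\''
      · subst hx2
        rw [if_pos rfl, if_pos rfl]
        unfold pvAltPair
        split_ifs <;> first | rfl | (exfalso; omega) | (exfalso; simp_all; omega) | (exfalso; simp_all)
      · rw [if_neg hx2, if_neg hx2, ih]
        unfold pvAltPair
        split_ifs <;> first | rfl | (exfalso; omega)

-- ===== VERDICT (by name: the statement is the Claim_ definition above) =====
theorem whichStaff_spec : Claim_equal_whichStaff := by
  intro s _
  unfold Spec_whichStaff whichStaff whichStaff_alt
  rw [pv_go_eq]
  simp only [PySem.Str.find_eq]
  rfl
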